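-- pv_equiv track=rewrite | github.com/edward0rtiz/holbertonschool-interview | 0x00-lockboxes/0-lockboxes.py | search_box
-- ===== SOURCE A (Python) =====
-- def search_box(boxes, unlocked_box, n_box):
--     """
--     Recursive function to iterate over the boxes and open if the n_box
--     is the same as the key_box
--     """
--     if len(n_box) > 0:
--         for box_key in n_box:
--             if (box_key < len(boxes)) and (box_key not in unlocked_box):
--                 unlocked_box.insert(-1, box_key)
--                 search_again = search_box(boxes, unlocked_box, boxes[box_key])
--                 unlocked_box = search_again
--         return unlocked_box
--     else:
--         return unlocked_box
-- ===== SOURCE B (Python) =====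
-- def search_box(boxes, unlocked_box, n_box):
--     """Iterative DFS with an explicit stack instead of A's recursion;
--     same in-place insert(-1) mutation of unlocked_box, same return value."""
--     stack = list(reversed(n_box))
--     while stack:
--         box_key = stack.pop()
--         if box_key < len(boxes) and box_key not in unlocked_box:
--             unlocked_box.insert(-1, box_key)
--             stack.extend(reversed(boxes[box_key]))
--     return unlocked_box
-- ===== Notes on version B (the rewrite author's own statement) =====
-- stated objective: alternative
-- what changed: A's recursive DFS (the call stack holds the pending key lists) is replaced by an iterative while-loop over one explicit stack of keys, with the same membership test, insert(-1) placement and in-place mutation of unlocked_box.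
import Mathlib
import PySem

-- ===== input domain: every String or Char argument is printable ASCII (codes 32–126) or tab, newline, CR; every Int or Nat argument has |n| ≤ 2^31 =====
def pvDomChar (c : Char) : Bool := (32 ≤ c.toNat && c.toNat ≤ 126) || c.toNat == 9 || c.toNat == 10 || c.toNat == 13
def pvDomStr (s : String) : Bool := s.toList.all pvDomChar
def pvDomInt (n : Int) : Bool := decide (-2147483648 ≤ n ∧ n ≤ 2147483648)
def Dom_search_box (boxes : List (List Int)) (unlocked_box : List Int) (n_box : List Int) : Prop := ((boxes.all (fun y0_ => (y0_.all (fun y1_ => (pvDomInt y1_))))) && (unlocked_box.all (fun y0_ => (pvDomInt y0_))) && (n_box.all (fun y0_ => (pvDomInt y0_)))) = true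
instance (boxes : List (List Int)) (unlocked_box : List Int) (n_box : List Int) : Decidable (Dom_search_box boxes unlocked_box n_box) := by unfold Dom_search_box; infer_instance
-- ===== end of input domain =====

-- B replaces A's recursive DFS by an iterative explicit-stack loop (same membership test,
-- same insert(-1) placement, same in-place mutation of unlocked_box and same return value).

-- Elements of PySem.List.insert xs i v are v plus the elements of xs.
theorem pvMemIns {x v : Int} (xs : List Int) (i : Int) :
    x ∈ PySem.List.insert xs i v ↔ x = v ∨ x ∈ xs := by
  unfold PySem.List.insert
  rcases PySem.List.sliceIndices xs.length (some i) none 1 with ⟨k, a, b⟩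
  simp only [List.mem_append, List.mem_cons]
  constructor
  · rintro (h | h | h)
    · exact Or.inr (List.mem_of_mem_take h)
    · exact Or.inl h
    · exact Or.inr (List.mem_of_mem_drop h)
  · rintro (h | h)
    · exact Or.inr (Or.inl h)
    · have : x ∈ List.take k.toNat xs ++ List.drop k.toNat xs := by
        rw [List.take_append_drop]; exact h
      rcases List.mem_append.1 this with h' | h'
      · exact Or.inl h'
      · exact Or.inr (Or.inr h')

-- Termination measure: how many candidate keys (ints in [-len, len)) are still missing from U.
def pvMiss (boxes : List (List Int)) (U : List Int) : Nat :=
  ((Finset.range (2 * boxes.length)).filter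
    (fun i : Nat => ((i : Int) - boxes.length) ∉ U)).card

theorem pvMiss_lt (boxes : List (List Int)) {U V : List Int} {k : Int}
    (hk1 : -(boxes.length : Int) ≤ k) (hk2 : k < (boxes.length : Int))
    (hkU : k ∉ U) (hsub : ∀ x, x ∈ U → x ∈ V) (hkV : k ∈ V) :
    pvMiss boxes V < pvMiss boxes U := by
  unfold pvMiss
  apply Finset.card_lt_card
  constructor
  · intro i hi
    simp only [Finset.mem_filter] at hi ⊢
    exact ⟨hi.1, fun hu => hi.2 (hsub _ hu)⟩
  · intro hsup
    have hmem : (k + boxes.length).toNat ∈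
        (Finset.range (2 * boxes.length)).filter
          (fun i : Nat => ((i : Int) - boxes.length) ∉ U) := by
      simp only [Finset.mem_filter, Finset.mem_range]
      constructor
      · omega
      · have : ((k + boxes.length).toNat : Int) - boxes.length = k := by omega
        rw [this]; exact hkU
    have := hsup hmem
    simp only [Finset.mem_filter] at this
    have heq : (((k + boxes.length).toNat : Int)) - boxes.length = k := by omega
    rw [heq] at this
    exact this.2 hkV

-- ===== PORT A =====
-- A's recursion, step for step.  The Python raises IndexError when boxes[box_key] is
-- out of range (pyGet? = none): the port propagates `none` there, and exactly those
-- inputs are excluded by Pre_search_box.  The result carries the invariant U ⊆ result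
-- (needed only for termination of the nested recursive call).
def searchGoA (boxes : List (List Int)) (U : List Int) (n : List Int) :
    Option {r : List Int // ∀ x, x ∈ U → x ∈ r} :=
  match n with
  | [] => some ⟨U, fun _ h => h⟩
  | k :: rest =>
    if hc : k < (boxes.length : Int) ∧ U.contains k = false then
      match hg : PySem.List.pyGet? boxes k with
      | some _ch =>
        match searchGoA boxes (PySem.List.insert U (-1) k) _ch with
        | none => none
        | some r =>
          match searchGoA boxes r.val rest with
          | none => none
          | some r2 =>
            some ⟨r2.val, fun x hx =>
              r2.prop x (r.prop x ((pvMemIns U (-1)).2 (Or.inr hx)))⟩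
      | none => none
    else
      match searchGoA boxes U rest with
      | none => none
      | some r => some ⟨r.val, r.prop⟩
termination_by (pvMiss boxes U, n.length)
decreasing_by
  · apply Prod.Lex.left
    have hr : PySem.Raise.InRange boxes.length k := by
      by_contra hnr
      rw [← PySem.List.pyGet?_eq_none_iff] at hnr
      rw [hg] at hnr; cases hnr
    rcases hr with ⟨h1, h2⟩
    exact pvMiss_lt boxes h1 h2
      (fun hm => by simp at hc; exact absurd hm hc.2)
      (fun x hx => (pvMemIns U (-1)).2 (Or.inr hx))
      ((pvMemIns U (-1)).2 (Or.inl rfl))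
  · apply Prod.Lex.left
    have hr : PySem.Raise.InRange boxes.length k := by
      by_contra hnr
      rw [← PySem.List.pyGet?_eq_none_iff] at hnr
      rw [hg] at hnr; cases hnr
    rcases hr with ⟨h1, h2⟩
    exact pvMiss_lt boxes h1 h2
      (fun hm => by simp at hc; exact absurd hm hc.2)
      (fun x hx => r.prop x ((pvMemIns U (-1)).2 (Or.inr hx)))
      (r.prop k ((pvMemIns U (-1)).2 (Or.inl rfl)))
  · exact Prod.Lex.right _ (by simp)

def search_box (boxes : List (List Int)) (unlocked_box : List Int) (n_box : List Int) : List Int :=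
  match searchGoA boxes unlocked_box n_box with
  | some r => r.val
  | none => unlocked_box   -- IndexError path, outside Pre_search_box

-- ===== PORT B =====
-- Source B's while-loop over an explicit stack.  The Python stack is a list popped from its
-- end; here the head of `st` is the top of that stack, so `stack = list(reversed(n_box))`
-- is `st = n_box` and `stack.extend(reversed(boxes[box_key]))` is `st = ch ++ s`.
def searchGoB (boxes : List (List Int)) (U : List Int) (st : List Int) : Option (List Int) :=
  match st with
  | [] => some U
  | k :: s =>
    if k < (boxes.length : Int) ∧ U.contains k = false then
      match hg : PySem.List.pyGet? boxes k with
      | some ch => searchGoB boxes (PySem.List.insert U (-1) k) (ch ++ s)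
      | none => none   -- IndexError path, outside Pre_search_box
    else
      searchGoB boxes U s
termination_by (pvMiss boxes U, st.length)
decreasing_by
  · apply Prod.Lex.left
    rename_i hc
    have hr : PySem.Raise.InRange boxes.length k := by
      by_contra hnr
      rw [← PySem.List.pyGet?_eq_none_iff] at hnr
      rw [hg] at hnr; cases hnr
    rcases hr with ⟨h1, h2⟩
    exact pvMiss_lt boxes h1 h2
      (fun hm => by simp at hc; exact absurd hm hc.2)
      (fun x hx => (pvMemIns U (-1)).2 (Or.inr hx))
      ((pvMemIns U (-1)).2 (Or.inl rfl))
  · exact Prod.Lex.right _ (by simp)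

def search_box_alt (boxes : List (List Int)) (unlocked_box : List Int) (n_box : List Int) : List Int :=
  match searchGoB boxes unlocked_box n_box with
  | some r => r
  | none => unlocked_box   -- IndexError path, outside Pre_search_box

-- ===== PRECONDITION & SPEC =====
-- pvKeyOK: key k is safe w.r.t. a claimed set S of openable box indices: if k is below
-- -len(boxes) (the only keys whose dereference raises) it is pre-listed in unlocked_box,
-- and if k would be opened (in range, not pre-listed) its box index is in S.
def pvKeyOK (boxes : List (List Int)) (unlocked_box : List Int) (S : Finset Nat) (k : Int) : Bool :=
  (decide (k < -(boxes.length : Int)) → unlocked_box.contains k) &&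
  (decide (-(boxes.length : Int) ≤ k) → decide (k < (boxes.length : Int)) → !unlocked_box.contains k →
    decide ((if k < 0 then k + boxes.length else k).toNat ∈ S))

-- Pre_ excludes exactly the inputs on which A (and equally B) raise IndexError — a key
-- below -len(boxes), not pre-listed in unlocked_box, reached from n_box through openable
-- boxes: the set S witnesses a reachability invariant (every key reachable from n_box or
-- from a box in S is safe), which exists iff no raising dereference is ever reached.
def Pre_search_box (boxes : List (List Int)) (unlocked_box : List Int) (n_box : List Int) : Prop :=
  ∃ S ∈ (Finset.range boxes.length).powerset,
    (∀ k ∈ n_box, pvKeyOK boxes unlocked_box S k = true) ∧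
    (∀ j ∈ S, ∀ k ∈ boxes.getD j [], pvKeyOK boxes unlocked_box S k = true)
instance (boxes : List (List Int)) (unlocked_box : List Int) (n_box : List Int) : Decidable (Pre_search_box boxes unlocked_box n_box) := by unfold Pre_search_box; infer_instance

def pvWitness_search_box : List (List Int) × List Int × List Int := ([[1], [2], []], [], [0])

def Spec_search_box (boxes : List (List Int)) (unlocked_box : List Int) (n_box : List Int) (out : List Int) : Prop := out = search_box_alt boxes unlocked_box n_box
instance (boxes : List (List Int)) (unlocked_box : List Int) (n_box : List Int) (out : List Int) : Decidable (Spec_search_box boxes unlocked_box n_box out) := by unfold Spec_search_box; infer_instance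

-- ===== CLAIM (what is proved, stated in full; the proofs are below) =====
def Claim_equal_search_box : Prop := ∀ (boxes : List (List Int)) (unlocked_box : List Int) (n_box : List Int), Dom_search_box boxes unlocked_box n_box → Pre_search_box boxes unlocked_box n_box → Spec_search_box boxes unlocked_box n_box (search_box boxes unlocked_box n_box)

-- ===== LEMMAS AND PROOFS =====

-- The stack machine run on n ++ s first performs exactly A's recursive processing of n,
-- then continues with s from the resulting list (and propagates the IndexError `none`).
theorem searchGoB_append (boxes : List (List Int)) (U : List Int) (n : List Int) :
    ∀ s : List Int, searchGoB boxes U (n ++ s) =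
      (searchGoA boxes U n).bind (fun r => searchGoB boxes r.val s) := by
  intro s
  fun_induction searchGoA boxes U n generalizing s with
  | case1 => simp
  | case2 U key tail cond ch hget hnone IH =>
    rw [List.cons_append, searchGoB, if_pos cond]
    split
    · rename_i ch1 heq
      rw [hget] at heq
      injection heq with heq
      subst heq
      rw [IH (tail ++ s), hnone]
      rfl
    · rename_i heq
      rw [hget] at heq
      cases heq
  | case3 U key tail cond ch hget rin hin hnone IH1 IH2 =>
    rw [List.cons_append, searchGoB, if_pos cond]
    split
    · rename_i ch1 heq
      rw [hget] at heq
      injection heq with heq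
      subst heq
      rw [IH1 (tail ++ s), hin]
      simp only [Option.bind_some]
      rw [IH2 s, hnone]
      rfl
    · rename_i heq
      rw [hget] at heq
      cases heq
  | case4 U key tail cond ch hget rin hin rout hout IH1 IH2 =>
    rw [List.cons_append, searchGoB, if_pos cond]
    split
    · rename_i ch1 heq
      rw [hget] at heq
      injection heq with heq
      subst heq
      rw [IH1 (tail ++ s), hin]
      simp only [Option.bind_some]
      rw [IH2 s, hout]
      rfl
    · rename_i heq
      rw [hget] at heq
      cases heq
  | case5 U key tail cond hget =>
    rw [List.cons_append, searchGoB, if_pos cond]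
    split
    · rename_i ch1 heq
      rw [hget] at heq
      cases heq
    · rfl
  | case6 U key tail cond hnone IH =>
    rw [List.cons_append, searchGoB, if_neg cond]
    rw [IH s, hnone]
  | case7 U key tail cond rin hin IH =>
    rw [List.cons_append, searchGoB, if_neg cond]
    rw [IH s, hin]


theorem search_box_eq (boxes : List (List Int)) (U : List Int) (n : List Int) :
    search_box boxes U n = search_box_alt boxes U n := by
  unfold search_box search_box_alt
  have h := searchGoB_append boxes U n []
  rw [List.append_nil] at h
  rw [h]
  cases searchGoA boxes U n with
  | none => rfl
  | some r => simp [searchGoB]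

-- ===== VERDICT (by name: the statement is the Claim_ definition above) =====
theorem search_box_spec : Claim_equal_search_box := by
  intro boxes U n _ _
  unfold Spec_search_box
  exact search_box_eq boxes U n
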